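-- pv_equiv track=rewrite | github.com/ViridaAlice/FKIE_movie_dialogue | evaluate_relationships.py | anonymize_interaction
-- ===== SOURCE A (Python) =====
-- def anonymize_interaction(interaction_lines):
--     """
--     Replaces real character names with 'Person A' and 'Person B'.
--     Returns the anonymized text lines (with indices) and the name mapping.
--     """
--     # Identify unique characters in order of appearance
--     unique_chars = []
--     for line in interaction_lines:
--         char_name = line.get("character", "Unknown")
--         if char_name not in unique_chars:
--             unique_chars.append(char_name)
--
--     # Create mapping (Only expecting 2 characters per file based on description)
--     char_map = {}
--     if len(unique_chars) > 0: char_map[unique_chars[0]] = "Person A"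
--     if len(unique_chars) > 1: char_map[unique_chars[1]] = "Person B"
--
--     # Fallback for unexpected extra characters
--     for i, char in enumerate(unique_chars[2:]):
--         char_map[char] = f"Person {chr(67+i)}" # C, D, etc.
--
--     anonymized_transcript = []
--
--     for idx, line_obj in enumerate(interaction_lines):
--         real_char = line_obj.get("character", "Unknown")
--         anon_char = char_map.get(real_char, "Unknown")
--         dialogue = line_obj.get("dialogue", "")
--
--         # Store index and text for the prompt
--         anonymized_transcript.append(f"[{idx}] {anon_char}: {dialogue}")
--
--     return "\n".join(anonymized_transcript), char_map
-- ===== SOURCE B (Python) =====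
-- def anonymize_interaction(interaction_lines):
--     """
--     Replaces real character names with 'Person A' and 'Person B'.
--     Returns the anonymized text lines (with indices) and the name mapping.
--     """
--     char_map = {}
--     transcript = []
--     for idx, line_obj in enumerate(interaction_lines):
--         char_name = line_obj.get("character", "Unknown")
--         if char_name not in char_map:
--             char_map[char_name] = f"Person {chr(65 + len(char_map))}"
--         transcript.append(f"[{idx}] {char_map[char_name]}: {line_obj.get('dialogue', '')}")
--     return "\n".join(transcript), char_map
-- ===== Notes on version B (the rewrite author's own statement) =====
-- stated objective: simpler
-- what changed: Replaces A's three passes (collect unique characters, build the map with positional [0]/[1]/drop-2 special cases, then render) by a single loop that assigns 'Person '+chr(65+len(char_map)) on first sight of a character and renders the line in the same pass.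
import Mathlib
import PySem

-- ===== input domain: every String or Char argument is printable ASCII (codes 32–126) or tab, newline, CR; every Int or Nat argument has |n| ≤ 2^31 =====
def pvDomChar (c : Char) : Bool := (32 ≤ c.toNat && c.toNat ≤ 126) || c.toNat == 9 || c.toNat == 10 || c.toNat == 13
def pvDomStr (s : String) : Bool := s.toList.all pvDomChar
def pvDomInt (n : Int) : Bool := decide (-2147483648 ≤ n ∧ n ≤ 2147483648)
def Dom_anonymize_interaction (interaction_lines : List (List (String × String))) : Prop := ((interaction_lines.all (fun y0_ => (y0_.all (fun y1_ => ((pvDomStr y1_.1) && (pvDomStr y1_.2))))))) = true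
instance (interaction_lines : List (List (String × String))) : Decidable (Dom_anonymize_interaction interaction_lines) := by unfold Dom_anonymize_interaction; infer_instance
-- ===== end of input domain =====

-- B replaces A's three passes (unique-character list, positional map building, rendering) by one loop
-- that labels each new character from the running map size while rendering; objective: simpler.


-- ===== PORT A =====
def anonymize_interaction (interaction_lines : List (List (String × String))) : String × (List (String × String)) :=
  let unique_chars : List String := interaction_lines.foldl (fun acc line =>
      let char_name := (PySem.Dict.mk line).getD "character" "Unknown"
      if acc.contains char_name then acc else acc ++ [char_name]) []
  let char_map : PySem.Dict String String := PySem.Dict.empty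
  let char_map := if 0 < unique_chars.length then
      char_map.insert (PySem.List.pyGetD unique_chars 0 "") "Person A" else char_map
  let char_map := if 1 < unique_chars.length then
      char_map.insert (PySem.List.pyGetD unique_chars 1 "") "Person B" else char_map
  let char_map := (PySem.List.enumerate (unique_chars.drop 2)).foldl
      (fun d p => d.insert p.2 ("Person " ++ String.ofList [Char.ofNat (67 + p.1.toNat)])) char_map
  let transcript : List String := (PySem.List.enumerate interaction_lines).foldl
      (fun acc p =>
        let real_char := (PySem.Dict.mk p.2).getD "character" "Unknown"
        let anon_char := char_map.getD real_char "Unknown"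
        let dialogue := (PySem.Dict.mk p.2).getD "dialogue" ""
        acc ++ ["[" ++ PySem.Int.toStr p.1 ++ "] " ++ anon_char ++ ": " ++ dialogue]) []
  (PySem.Str.join "\n" transcript, char_map.items)

-- ===== PORT B =====
def anonymize_interaction_alt (interaction_lines : List (List (String × String))) : String × (List (String × String)) :=
  let st := (PySem.List.enumerate interaction_lines).foldl
      (fun (st : List String × PySem.Dict String String) p =>
        let char_name := (PySem.Dict.mk p.2).getD "character" "Unknown"
        let char_map := if st.2.contains char_name then st.2
          else st.2.insert char_name ("Person " ++ String.ofList [Char.ofNat (65 + st.2.size)])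
        -- char_map[char_name]: the key was just ensured present, so the KeyError branch (none) is unreachable
        (st.1 ++ ["[" ++ PySem.Int.toStr p.1 ++ "] " ++ ((char_map.get? char_name).getD "")
                   ++ ": " ++ (PySem.Dict.mk p.2).getD "dialogue" ""], char_map))
      ([], PySem.Dict.empty)
  (PySem.Str.join "\n" st.1, st.2.items)

-- ===== PRECONDITION & SPEC =====
def Spec_anonymize_interaction (interaction_lines : List (List (String × String))) (out : String × (List (String × String))) : Prop := out = anonymize_interaction_alt interaction_lines
instance (interaction_lines : List (List (String × String))) (out : String × (List (String × String))) : Decidable (Spec_anonymize_interaction interaction_lines out) := by unfold Spec_anonymize_interaction; infer_instance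

-- ===== CLAIM (what is proved, stated in full; the proofs are below) =====
def Claim_equal_anonymize_interaction : Prop := ∀ (interaction_lines : List (List (String × String))), Dom_anonymize_interaction interaction_lines → Spec_anonymize_interaction interaction_lines (anonymize_interaction interaction_lines)

-- ===== LEMMAS AND PROOFS =====

def pvCharOf (line : List (String × String)) : String :=
  (PySem.Dict.mk line).getD "character" "Unknown"
def pvLabel (n : Nat) : String := "Person " ++ String.ofList [Char.ofNat (65 + n)]
def pvItems : List String → Nat → List (String × String)
  | [], _ => []
  | a :: t, n => (a, pvLabel n) :: pvItems t (n + 1)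
def pvStepB (st : List String × PySem.Dict String String)
    (p : Int × List (String × String)) : List String × PySem.Dict String String :=
  let char_name := (PySem.Dict.mk p.2).getD "character" "Unknown"
  let char_map := if st.2.contains char_name then st.2
    else st.2.insert char_name ("Person " ++ String.ofList [Char.ofNat (65 + st.2.size)])
  (st.1 ++ ["[" ++ PySem.Int.toStr p.1 ++ "] " ++ ((char_map.get? char_name).getD "")
             ++ ": " ++ (PySem.Dict.mk p.2).getD "dialogue" ""], char_map)

theorem pvItems_length (u : List String) : ∀ n, (pvItems u n).length = u.length := by
  induction u with
  | nil => intro n; rfl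
  | cons a t ih => intro n; simp [pvItems, ih]
theorem pvItems_append_one (u : List String) (c : String) : ∀ n,
    pvItems (u ++ [c]) n = pvItems u n ++ [(c, pvLabel (n + u.length))] := by
  induction u with
  | nil => intro n; simp [pvItems]
  | cons a t ih =>
      intro n
      simp only [List.cons_append, pvItems, ih (n + 1), List.length_cons]
      have : n + 1 + t.length = n + (t.length + 1) := by omega
      simp [this]
theorem pvItems_get?_mem (c : String) : ∀ (u : List String) (n : Nat), c ∈ u →
    (PySem.Dict.mk (pvItems u n)).get? c = some (pvLabel (n + u.idxOf c)) := by
  intro u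
  induction u with
  | nil => intro n h; cases h
  | cons a t ih =>
      intro n h
      rw [pvItems, PySem.Dict.get?_mk_cons]
      by_cases hac : a = c
      · subst hac; simp [List.idxOf_cons_self]
      · have hct : c ∈ t := by cases List.mem_cons.mp h with
          | inl h' => exact absurd h'.symm hac
          | inr h' => exact h'
        have hbeq : (a == c) = false := by simp [hac]
        rw [hbeq, if_neg (by simp), ih (n + 1) hct, List.idxOf_cons_ne _ (by simp [hac])]
        have : n + 1 + t.idxOf c = n + (t.idxOf c + 1) := by omega
        simp [this]
theorem pvItems_get?_not_mem (c : String) : ∀ (u : List String) (n : Nat), c ∉ u →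
    (PySem.Dict.mk (pvItems u n)).get? c = none := by
  intro u
  induction u with
  | nil => intro n _; rfl
  | cons a t ih =>
      intro n h
      rw [pvItems, PySem.Dict.get?_mk_cons]
      have hac : (a == c) = false := by
        simp only [beq_eq_false_iff_ne]; intro hh; exact h (hh ▸ List.mem_cons_self)
      rw [hac, if_neg (by simp)]
      exact ih (n + 1) (fun hc => h (List.mem_cons_of_mem _ hc))
theorem pvItems_contains (c : String) (u : List String) (n : Nat) :
    (PySem.Dict.mk (pvItems u n)).contains c = decide (c ∈ u) := by
  rw [PySem.Dict.contains_eq_isSome_get?]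
  by_cases h : c ∈ u
  · rw [pvItems_get?_mem c u n h]; simp [h]
  · rw [pvItems_get?_not_mem c u n h]; simp [h]

theorem pvStepB_mem (T : List String) (u : List String) (s : Int)
    (l : List (String × String)) (h : pvCharOf l ∈ u) :
    pvStepB (T, PySem.Dict.mk (pvItems u 0)) (s, l)
    = (T ++ ["[" ++ PySem.Int.toStr s ++ "] " ++ pvLabel (u.idxOf (pvCharOf l))
              ++ ": " ++ (PySem.Dict.mk l).getD "dialogue" ""],
       PySem.Dict.mk (pvItems u 0)) := by
  simp only [pvStepB]
  rw [show (PySem.Dict.mk l).getD "character" "Unknown" = pvCharOf l from rfl]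
  rw [pvItems_contains]
  simp only [h, decide_true, if_true]
  rw [pvItems_get?_mem (pvCharOf l) u 0 h]
  simp

theorem pvStepB_not_mem (T : List String) (u : List String) (s : Int)
    (l : List (String × String)) (h : pvCharOf l ∉ u) :
    pvStepB (T, PySem.Dict.mk (pvItems u 0)) (s, l)
    = (T ++ ["[" ++ PySem.Int.toStr s ++ "] "
              ++ pvLabel ((u ++ [pvCharOf l]).idxOf (pvCharOf l))
              ++ ": " ++ (PySem.Dict.mk l).getD "dialogue" ""],
       PySem.Dict.mk (pvItems (u ++ [pvCharOf l]) 0)) := by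
  simp only [pvStepB]
  rw [show (PySem.Dict.mk l).getD "character" "Unknown" = pvCharOf l from rfl]
  rw [pvItems_contains]
  have hins : (PySem.Dict.mk (pvItems u 0)).insert (pvCharOf l)
      ("Person " ++ String.ofList [Char.ofNat (65 + (PySem.Dict.mk (pvItems u 0)).size)])
      = PySem.Dict.mk (pvItems (u ++ [pvCharOf l]) 0) := by
    apply PySem.Dict.ext
    rw [PySem.Dict.items_insert_of_not_contains]
    · show pvItems u 0 ++ _ = _
      rw [pvItems_append_one]
      have : (PySem.Dict.mk (pvItems u 0)).size = u.length := by
        show (pvItems u 0).length = _; exact pvItems_length u 0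
      rw [this]
      simp [pvLabel]
    · rw [pvItems_contains]; simp [h]
  simp only [h, decide_false, if_false, Bool.false_eq_true]
  rw [hins, pvItems_get?_mem _ _ 0 (by simp)]
  simp

theorem pv_loopB (ls : List (List (String × String))) : ∀ (s : Int) (T : List String) (u : List String),
    (PySem.List.enumerate ls s).foldl pvStepB (T, PySem.Dict.mk (pvItems u 0))
    = (T ++ (PySem.List.enumerate ls s).map (fun p =>
        "[" ++ PySem.Int.toStr p.1 ++ "] "
          ++ pvLabel ((PySem.Set.update u (ls.map pvCharOf)).idxOf (pvCharOf p.2))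
          ++ ": " ++ (PySem.Dict.mk p.2).getD "dialogue" ""),
       PySem.Dict.mk (pvItems (PySem.Set.update u (ls.map pvCharOf)) 0)) := by
  induction ls with
  | nil => intro s T u; simp [PySem.List.enumerate, PySem.Set.update]
  | cons l t ih =>
      intro s T u
      rw [PySem.List.enumerate_cons, List.foldl_cons, List.map_cons, List.map_cons,
          PySem.Set.update_cons]
      by_cases h : pvCharOf l ∈ u
      · have hadd : PySem.Set.add u (pvCharOf l) = u := by
          simp [PySem.Set.add, PySem.Set.contains, h]
        rw [hadd, pvStepB_mem T u s l h, ih (s + 1)]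
        rw [PySem.Set.update_eq_append_filter]
        rw [List.idxOf_append_of_mem h]
        simp
      · have hadd : PySem.Set.add u (pvCharOf l) = u ++ [pvCharOf l] := by
          simp [PySem.Set.add, PySem.Set.contains, h]
        rw [hadd, pvStepB_not_mem T u s l h, ih (s + 1)]
        rw [PySem.Set.update_eq_append_filter]
        rw [List.idxOf_append_of_mem (by simp : pvCharOf l ∈ u ++ [pvCharOf l])]
        simp

theorem pvLabelA : "Person A" = pvLabel 0 := by decide
theorem pvLabelB : "Person B" = pvLabel 1 := by decide

theorem pv_enum_items (t : List String) : ∀ n : Nat,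
    (PySem.List.enumerate t (n : Int)).map
      (fun p => (p.2, "Person " ++ String.ofList [Char.ofNat (67 + p.1.toNat)]))
    = pvItems t (n + 2) := by
  induction t with
  | nil => intro n; rfl
  | cons x t' ih =>
      intro n
      rw [PySem.List.enumerate_cons, List.map_cons]
      have h1 : ((n : Int) + 1) = ((n + 1 : Nat) : Int) := by push_cast; ring
      rw [h1, ih (n + 1), pvItems]
      have h2 : ((n : Int)).toNat = n := Int.toNat_natCast n
      have h3 : (67 + n) = 65 + (n + 2) := by omega
      have h4 : n + 1 + 2 = n + 2 + 1 := by omega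
      rw [h2, h3, h4]
      rfl

theorem pv_uniq_eq (interaction_lines : List (List (String × String))) :
    interaction_lines.foldl (fun acc line =>
      if acc.contains ((PySem.Dict.mk line).getD "character" "Unknown") then acc
      else acc ++ [(PySem.Dict.mk line).getD "character" "Unknown"]) []
    = PySem.Set.ofList (interaction_lines.map pvCharOf) := by
  rw [← PySem.Set.update_nil_left, PySem.Set.update_map_eq_foldl_add]
  apply PySem.List.foldl_congr_mem
  intro acc line _
  simp [PySem.Set.add, PySem.Set.contains, pvCharOf]

theorem pv_dictA_eq (u : List String) (hnd : u.Nodup) :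
    ((PySem.List.enumerate (u.drop 2)).foldl
      (fun d p => d.insert p.2 ("Person " ++ String.ofList [Char.ofNat (67 + p.1.toNat)]))
      (if 1 < u.length then
        (if 0 < u.length then
          (PySem.Dict.empty : PySem.Dict String String).insert (PySem.List.pyGetD u 0 "") "Person A"
         else PySem.Dict.empty).insert (PySem.List.pyGetD u 1 "") "Person B"
       else (if 0 < u.length then
          (PySem.Dict.empty : PySem.Dict String String).insert (PySem.List.pyGetD u 0 "") "Person A"
         else PySem.Dict.empty)))
    = PySem.Dict.mk (pvItems u 0) := by
  match u, hnd with
  | [], _ => rfl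
  | [a], _ =>
      show (PySem.List.enumerate [] (0:Int)).foldl _ _ = _
      simp only [PySem.List.enumerate_nil, List.foldl_nil]
      apply PySem.Dict.ext
      simp only [List.length_cons, List.length_nil, if_pos (by omega : 0 < 1), if_neg (by omega : ¬ 1 < 1)]
      rw [PySem.Dict.items_insert_of_not_contains _ _ (PySem.Dict.contains_empty _)]
      rw [PySem.List.pyGetD_ofNat']
      simp [pvItems, pvLabelA, PySem.Dict.empty]
  | a :: b :: t, hnd =>
      have hab : a ≠ b := by simp [List.nodup_cons] at hnd; tauto
      have hbt : b ∉ t := by simp [List.nodup_cons] at hnd; tauto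
      have hat : a ∉ t := by simp [List.nodup_cons] at hnd; tauto
      have hndt : t.Nodup := by simp [List.nodup_cons] at hnd; tauto
      apply PySem.Dict.ext
      have hlen1 : 0 < (a :: b :: t).length := by simp
      have hlen2 : 1 < (a :: b :: t).length := by simp
      rw [if_pos hlen2, if_pos hlen1]
      have hg0 : PySem.List.pyGetD (a :: b :: t) 0 "" = a := by
        rw [PySem.List.pyGetD_ofNat']; rfl
      have hg1 : PySem.List.pyGetD (a :: b :: t) 1 "" = b := by
        rw [PySem.List.pyGetD_ofNat']; rfl
      rw [hg0, hg1]
      have hd2 : (a :: b :: t).drop 2 = t := rfl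
      rw [hd2]
      have hbase : ((PySem.Dict.empty : PySem.Dict String String).insert a "Person A").insert b "Person B"
          = PySem.Dict.mk [(a, pvLabel 0), (b, pvLabel 1)] := by
        apply PySem.Dict.ext
        have hc1 : ((PySem.Dict.empty : PySem.Dict String String).insert a "Person A").contains b = false := by
          rw [PySem.Dict.contains_eq_decide_mem_keys]
          rw [PySem.Dict.keys, PySem.Dict.items_insert_of_not_contains _ _ (PySem.Dict.contains_empty _)]
          simp [PySem.Dict.empty, Ne.symm hab]
        rw [PySem.Dict.items_insert_of_not_contains _ _ hc1,
            PySem.Dict.items_insert_of_not_contains _ _ (PySem.Dict.contains_empty _)]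
        simp [PySem.Dict.empty, pvLabelA, pvLabelB]
      rw [hbase]
      rw [PySem.Dict.items_foldl_insert_fresh (PySem.List.enumerate t)
        (fun (p : Int × String) => p.2)
        (fun (p : Int × String) => "Person " ++ String.ofList [Char.ofNat (67 + p.1.toNat)])]
      · show [(a, pvLabel 0), (b, pvLabel 1)] ++ _ = _
        rw [show ((0:Int) = ((0:Nat):Int)) from rfl] at *
        rw [show (PySem.List.enumerate t ((0:Nat):Int)).map (fun (p : Int × String) => (p.2, "Person " ++ String.ofList [Char.ofNat (67 + p.1.toNat)])) = pvItems t (0 + 2) from pv_enum_items t 0]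
        simp [pvItems]
      · intro p hp
        have hsnd : p.2 ∈ t := by
          have := PySem.List.map_snd_enumerate t (0:Int)
          exact this ▸ List.mem_map_of_mem hp
        rw [PySem.Dict.contains_eq_decide_mem_keys]
        simp only [PySem.Dict.keys]
        simp only [List.map_cons, List.map_nil]
        have h1 : p.2 ≠ a := fun hh => hat (hh ▸ hsnd)
        have h2 : p.2 ≠ b := fun hh => hbt (hh ▸ hsnd)
        simp [h1, h2]
      · rw [PySem.List.map_snd_enumerate]; exact hndt

theorem pv_a_eval (ls : List (List (String × String))) :
    anonymize_interaction ls
    = (PySem.Str.join "\n" ((PySem.List.enumerate ls).map (fun p =>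
        "[" ++ PySem.Int.toStr p.1 ++ "] "
          ++ (PySem.Dict.mk (pvItems (PySem.Set.ofList (ls.map pvCharOf)) 0)).getD (pvCharOf p.2) "Unknown"
          ++ ": " ++ (PySem.Dict.mk p.2).getD "dialogue" "")),
       pvItems (PySem.Set.ofList (ls.map pvCharOf)) 0) := by
  simp only [anonymize_interaction]
  simp only [pv_uniq_eq]
  simp only [pv_dictA_eq (PySem.Set.ofList (ls.map pvCharOf)) (PySem.Set.nodup_ofList _)]
  rw [PySem.List.foldl_append_singleton_eq_map (fun p : Int × List (String × String) =>
        "[" ++ PySem.Int.toStr p.1 ++ "] "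
          ++ (PySem.Dict.mk (pvItems (PySem.Set.ofList (ls.map pvCharOf)) 0)).getD
               ((PySem.Dict.mk p.2).getD "character" "Unknown") "Unknown"
          ++ ": " ++ (PySem.Dict.mk p.2).getD "dialogue" "")]
  simp [pvCharOf]

theorem pv_b_eval (ls : List (List (String × String))) :
    anonymize_interaction_alt ls
    = (PySem.Str.join "\n" ((PySem.List.enumerate ls).map (fun p =>
        "[" ++ PySem.Int.toStr p.1 ++ "] "
          ++ pvLabel ((PySem.Set.ofList (ls.map pvCharOf)).idxOf (pvCharOf p.2))
          ++ ": " ++ (PySem.Dict.mk p.2).getD "dialogue" "")),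
       pvItems (PySem.Set.ofList (ls.map pvCharOf)) 0) := by
  show (let st := (PySem.List.enumerate ls).foldl pvStepB ([], PySem.Dict.mk (pvItems [] 0));
        (PySem.Str.join "\n" st.1, st.2.items)) = _
  rw [pv_loopB ls 0 [] []]
  rw [PySem.Set.update_nil_left]
  rfl

theorem pv_final (ls : List (List (String × String))) :
    anonymize_interaction ls = anonymize_interaction_alt ls := by
  rw [pv_a_eval, pv_b_eval]
  refine Prod.ext ?_ rfl
  show PySem.Str.join _ _ = PySem.Str.join _ _
  congr 1
  apply List.map_congr_left
  intro p hp
  have hmem : pvCharOf p.2 ∈ PySem.Set.ofList (ls.map pvCharOf) := by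
    rw [PySem.Set.mem_ofList]
    have : p.2 ∈ ls := by
      have := PySem.List.map_snd_enumerate ls (0:Int)
      exact this ▸ List.mem_map_of_mem hp
    exact List.mem_map_of_mem this
  rw [PySem.Dict.getD_eq_get?_getD, pvItems_get?_mem _ _ 0 hmem]
  simp

-- ===== VERDICT (by name: the statement is the Claim_ definition above) =====
theorem anonymize_interaction_spec : Claim_equal_anonymize_interaction := by
  intro interaction_lines _
  unfold Spec_anonymize_interaction
  exact pv_final interaction_lines
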